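-- pv_equiv track=rewrite | github.com/Youssefelsayed148/obe-architect-chatbot-version2 | app/services/rag_public.py | _safe_follow_up_candidates
-- ===== SOURCE A (Python) =====
-- def _safe_follow_up_candidates(sources: list[dict[str, str | None]]) -> list[str]:
--     candidates: list[str] = []
--     if any(str(src.get("size") or "").strip() for src in sources):
--         candidates.append("Which project has the largest built-up area in these sources?")
--     if any(str(src.get("status") or "").strip() for src in sources):
--         candidates.append("Which projects in these sources are marked as completed?")
--     locations = [str(src.get("location") or "").strip() for src in sources if str(src.get("location") or "").strip()]
--     if locations:
--         candidates.append(f"Which projects in these sources are located in {locations[0]}?")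
--     return candidates
-- ===== SOURCE B (Python) =====
-- def _safe_follow_up_candidates(sources: list[dict[str, str | None]]) -> list[str]:
--     # One pass over sources maintaining flags and the first non-empty location,
--     # instead of three independent scans.
--     has_size = False
--     has_status = False
--     first_location = None
--     for src in sources:
--         if str(src.get("size") or "").strip():
--             has_size = True
--         if str(src.get("status") or "").strip():
--             has_status = True
--         if first_location is None:
--             loc = str(src.get("location") or "").strip()
--             if loc:
--                 first_location = loc
--     out: list[str] = []
--     if has_size:
--         out.append("Which project has the largest built-up area in these sources?")
--     if has_status:
--         out.append("Which projects in these sources are marked as completed?")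
--     if first_location is not None:
--         out.append(f"Which projects in these sources are located in {first_location}?")
--     return out
-- ===== Notes on version B (the rewrite author's own statement) =====
-- stated objective: alternative
-- what changed: B replaces A's three independent scans over sources (two any() scans and a list comprehension) with a single loop maintaining two boolean flags and the first non-empty location, then emits the questions from that state.
import Mathlib
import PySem

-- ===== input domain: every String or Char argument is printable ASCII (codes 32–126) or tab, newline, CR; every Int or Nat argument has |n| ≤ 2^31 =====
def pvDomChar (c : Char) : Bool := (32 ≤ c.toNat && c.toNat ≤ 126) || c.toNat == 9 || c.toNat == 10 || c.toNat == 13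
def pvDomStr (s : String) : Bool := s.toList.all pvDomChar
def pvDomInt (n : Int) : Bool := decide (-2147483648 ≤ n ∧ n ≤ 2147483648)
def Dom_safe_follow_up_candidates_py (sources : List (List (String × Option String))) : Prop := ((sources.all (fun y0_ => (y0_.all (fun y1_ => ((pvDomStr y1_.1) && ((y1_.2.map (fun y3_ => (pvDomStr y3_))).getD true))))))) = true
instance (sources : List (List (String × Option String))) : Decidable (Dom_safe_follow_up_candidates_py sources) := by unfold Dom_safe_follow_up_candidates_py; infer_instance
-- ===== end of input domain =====

-- ===== PORT A =====
-- str(src.get(k) or "").strip(): first-match lookup in the association list, None/missing -> ""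
def pvFieldStripped (src : List (String × Option String)) (k : String) : String :=
  match src.find? (fun p => p.1 == k) with
  | some (_, some s) => PySem.Str.strip s
  | _ => ""

def safe_follow_up_candidates_py (sources : List (List (String × Option String))) : List String :=
  let candidates : List String := []
  let candidates := if sources.any (fun src => pvFieldStripped src "size" != "") then
      candidates ++ ["Which project has the largest built-up area in these sources?"] else candidates
  let candidates := if sources.any (fun src => pvFieldStripped src "status" != "") then
      candidates ++ ["Which projects in these sources are marked as completed?"] else candidates
  let locations := (sources.map (fun src => pvFieldStripped src "location")).filter (fun s => s != "")
  match locations with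
  | [] => candidates
  | l0 :: _ => candidates ++ ["Which projects in these sources are located in " ++ l0 ++ "?"]

-- ===== PORT B =====
-- one pass: (has_size, has_status, first_location)
def pvStepB (st : Bool × Bool × Option String) (src : List (String × Option String)) :
    Bool × Bool × Option String :=
  (st.1 || pvFieldStripped src "size" != "",
   st.2.1 || pvFieldStripped src "status" != "",
   match st.2.2 with
   | some l => some l
   | none =>
     let loc := pvFieldStripped src "location"
     if loc != "" then some loc else none)

def safe_follow_up_candidates_py_alt (sources : List (List (String × Option String))) : List String :=
  let st := sources.foldl pvStepB (false, false, none)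
  (if st.1 then ["Which project has the largest built-up area in these sources?"] else []) ++
  (if st.2.1 then ["Which projects in these sources are marked as completed?"] else []) ++
  (match st.2.2 with
   | some l => ["Which projects in these sources are located in " ++ l ++ "?"]
   | none => [])

-- ===== PRECONDITION & SPEC =====
def Spec_safe_follow_up_candidates_py (sources : List (List (String × Option String))) (out : List String) : Prop := out = safe_follow_up_candidates_py_alt sources
instance (sources : List (List (String × Option String))) (out : List String) : Decidable (Spec_safe_follow_up_candidates_py sources out) := by unfold Spec_safe_follow_up_candidates_py; infer_instance

-- ===== CLAIM =====
def Claim_equal_safe_follow_up_candidates_py : Prop := ∀ (sources : List (List (String × Option String))), Dom_safe_follow_up_candidates_py sources → Spec_safe_follow_up_candidates_py sources (safe_follow_up_candidates_py sources)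

-- ===== LEMMAS AND PROOFS =====
theorem pvFoldB_char (l : List (List (String × Option String))) (a b : Bool) (c : Option String) :
    l.foldl pvStepB (a, b, c) =
      (a || l.any (fun src => pvFieldStripped src "size" != ""),
       b || l.any (fun src => pvFieldStripped src "status" != ""),
       match c with
       | some x => some x
       | none => ((l.map (fun src => pvFieldStripped src "location")).filter (fun s => s != "")).head?) := by
  induction l generalizing a b c with
  | nil => cases c <;> simp
  | cons hd tl ih =>
    simp only [List.foldl_cons, List.any_cons, List.map_cons, List.filter_cons]
    rw [pvStepB, ih]
    cases c with
    | some x => simp [Bool.or_assoc]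
    | none =>
      by_cases h : pvFieldStripped hd "location" != "" <;>
        simp [h, Bool.or_assoc]

-- ===== VERDICT =====
theorem safe_follow_up_candidates_py_spec : Claim_equal_safe_follow_up_candidates_py := by
  intro sources _
  unfold Spec_safe_follow_up_candidates_py safe_follow_up_candidates_py safe_follow_up_candidates_py_alt
  rw [pvFoldB_char]
  simp only [Bool.false_or]
  by_cases h1 : sources.any (fun src => pvFieldStripped src "size" != "") <;>
  by_cases h2 : sources.any (fun src => pvFieldStripped src "status" != "") <;>
  cases hl : ((sources.map (fun src => pvFieldStripped src "location")).filter (fun s => s != "")).head? <;>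
  cases hloc : (sources.map (fun src => pvFieldStripped src "location")).filter (fun s => s != "") <;>
  simp_all <;> split_ifs <;> simp_all
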